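-- pv_equiv track=rewrite | github.com/cirosantilli/project-euler-solutions | solvers/902.py | build_cycles
-- ===== SOURCE A (Python) =====
-- A = 1_000_000_007  # multiplier in tau
--
-- def egcd(a: int, b: int) -> tuple[int, int, int]:
--     """Return (g, x, y) such that a*x + b*y = g = gcd(a, b)."""
--     x0, y0, x1, y1 = 1, 0, 0, 1
--     while b:
--         q = a // b
--         a, b = b, a - q * b
--         x0, x1 = x1, x0 - q * x1
--         y0, y1 = y1, y0 - q * y1
--     return a, x0, y0
--
-- def inv_mod(a: int, m: int) -> int:
--     """Modular inverse of a modulo m, assuming gcd(a,m)=1."""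
--     if m == 1:
--         return 0
--     g, x, _ = egcd(a % m, m)
--     if g != 1:
--         raise ValueError("inverse does not exist")
--     return x % m
--
-- def build_cycles(m: int, n: int) -> tuple[list[list[int]], list[int], list[int]]:
--     """Build cycles of pi in forward order, plus element->(length, offset)."""
--     cycles: list[list[int]] = [[] for _ in range(m + 1)]
--     clen = [0] * (n + 1)
--     coff = [0] * (n + 1)
--
--     if n == 1:
--         cycles[1] = [1]
--         clen[1] = 1
--         coff[1] = 0
--         return cycles, clen, coff
--
--     inva = inv_mod(A % n, n)
--
--     def tau_inv(x: int) -> int: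
--         # x in 1..n. Solve (A*i mod n)+1 = x.
--         t = (inva * ((x - 1) % n)) % n
--         return n if t == 0 else t
--
--     for l in range(1, m + 1):
--         start = l * (l - 1) // 2 + 1
--         cyc = [tau_inv(x) for x in range(start, start + l)]
--         cycles[l] = cyc
--         for idx, elem in enumerate(cyc):
--             clen[elem] = l
--             coff[elem] = idx
--
--     return cycles, clen, coff
-- ===== SOURCE B (Python) =====
-- A = 1_000_000_007  # multiplier in tau
--
--
-- def build_cycles(m: int, n: int) -> tuple[list[list[int]], list[int], list[int]]:
--     """Build cycles of pi in forward order, plus element->(length, offset).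
--
--     Instead of inverting A modulo n with egcd and evaluating the inverse per
--     position, sweep the elements 1..n forward once to tabulate the inverse
--     permutation, then read cycle entries off the table.
--     """
--     cycles: list[list[int]] = [[] for _ in range(m + 1)]
--     clen = [0] * (n + 1)
--     coff = [0] * (n + 1)
--
--     if n == 1:
--         cycles[1] = [1]
--         clen[1] = 1
--         coff[1] = 0
--         return cycles, clen, coff
--
--     # p[j] = the element e in 1..n with (A*e) % n == j, i.e. tau_inv(j+1).
--     p = [0] * n
--     for e in range(1, n + 1):
--         p[A * e % n] = e
--
--     for l in range(1, m + 1):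
--         base = l * (l - 1) // 2
--         cyc: list[int] = []
--         for idx in range(l):
--             e = p[(base + idx) % n]
--             cyc.append(e)
--             clen[e] = l
--             coff[e] = idx
--         cycles[l] = cyc
--
--     return cycles, clen, coff
-- ===== Notes on version B (the rewrite author's own statement) =====
-- stated objective: faster
-- what changed: Replaces the egcd-based modular inverse and the per-position big-multiplier tau_inv arithmetic with a single forward sweep over the elements 1..n that tabulates the inverse permutation; cycle entries are then plain table lookups.
import Mathlib
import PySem

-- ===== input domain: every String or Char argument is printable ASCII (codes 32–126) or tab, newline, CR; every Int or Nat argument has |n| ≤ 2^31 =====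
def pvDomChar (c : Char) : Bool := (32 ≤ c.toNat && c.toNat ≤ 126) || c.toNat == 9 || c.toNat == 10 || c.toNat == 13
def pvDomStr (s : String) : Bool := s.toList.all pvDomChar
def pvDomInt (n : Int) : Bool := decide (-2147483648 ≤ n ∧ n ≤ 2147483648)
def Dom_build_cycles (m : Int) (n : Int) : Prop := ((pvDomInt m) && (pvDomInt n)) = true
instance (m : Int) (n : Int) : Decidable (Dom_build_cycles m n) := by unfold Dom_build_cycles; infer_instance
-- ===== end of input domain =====

-- B replaces A's egcd modular inverse + per-position tau_inv arithmetic by one forward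
-- sweep tabulating the inverse permutation; cycle entries become table lookups (objective: faster).

-- ===== PORT A =====

-- while b: loop of egcd, as recursion on |b|
def egcdGo (a b x0 y0 x1 y1 : Int) : Int × Int × Int :=
  if hb : b = 0 then (a, x0, y0)
  else
    let q := PySem.Int.floordiv a b
    egcdGo b (a - q * b) x1 y1 (x0 - q * x1) (y0 - q * y1)
termination_by b.natAbs
decreasing_by
  have h := PySem.Int.floordiv_mul_add_mod a b
  rcases lt_or_gt_of_ne hb with hneg | hpos
  · have h1 := PySem.Int.mod_neg_bounds (a:=a) hneg
    omega
  · have h1 := PySem.Int.mod_nonneg (a:=a) hpos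
    have h2 := PySem.Int.mod_lt (a:=a) hpos
    omega

def egcd (a b : Int) : Int × Int × Int := egcdGo a b 1 0 0 1

-- Python raises ValueError on the g ≠ 1 branch; those inputs are outside Pre_, the port returns 0 there.
def inv_mod (a m : Int) : Int :=
  if m = 1 then 0
  else
    let r := egcd (PySem.Int.mod a m) m
    if r.1 ≠ 1 then 0
    else PySem.Int.mod r.2.1 m

def tau_inv (inva n x : Int) : Int :=
  let t := PySem.Int.mod (inva * PySem.Int.mod (x - 1) n) n
  if t = 0 then n else t

def build_cycles (m : Int) (n : Int) : List (List Int) × List Int × List Int :=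
  let cycles : List (List Int) := List.replicate (m + 1).toNat []
  let clen : List Int := List.replicate (n + 1).toNat 0
  let coff : List Int := List.replicate (n + 1).toNat 0
  if n = 1 then
    (PySem.List.pySetD cycles 1 [1], PySem.List.pySetD clen 1 1, PySem.List.pySetD coff 1 0)
  else
    let inva := inv_mod (PySem.Int.mod 1000000007 n) n
    (PySem.List.pyRange 1 (m + 1) 1).foldl (fun st l =>
      let start := PySem.Int.floordiv (l * (l - 1)) 2 + 1
      let cyc := (PySem.List.pyRange start (start + l) 1).map (fun x => tau_inv inva n x)
      let cl := (PySem.List.enumerate cyc 0).foldl (fun p ie =>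
        (PySem.List.pySetD p.1 ie.2 l, PySem.List.pySetD p.2 ie.2 ie.1)) (st.2.1, st.2.2)
      (PySem.List.pySetD st.1 l cyc, cl.1, cl.2)) (cycles, clen, coff)

-- ===== PORT B =====

def build_cycles_alt (m : Int) (n : Int) : List (List Int) × List Int × List Int :=
  let cycles : List (List Int) := List.replicate (m + 1).toNat []
  let clen : List Int := List.replicate (n + 1).toNat 0
  let coff : List Int := List.replicate (n + 1).toNat 0
  if n = 1 then
    (PySem.List.pySetD cycles 1 [1], PySem.List.pySetD clen 1 1, PySem.List.pySetD coff 1 0)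
  else
    let p := (PySem.List.pyRange 1 (n + 1) 1).foldl
      (fun p e => PySem.List.pySetD p (PySem.Int.mod (1000000007 * e) n) e)
      (List.replicate n.toNat 0)
    (PySem.List.pyRange 1 (m + 1) 1).foldl (fun st l =>
      let base := PySem.Int.floordiv (l * (l - 1)) 2
      let inner := (PySem.List.pyRange 0 l 1).foldl (fun s idx =>
        let e := PySem.List.pyGetD p (PySem.Int.mod (base + idx) n) 0
        (s.1 ++ [e], PySem.List.pySetD s.2.1 e l, PySem.List.pySetD s.2.2 e idx))
        ([], st.2.1, st.2.2)
      (PySem.List.pySetD st.1 l inner.1, inner.2.1, inner.2.2)) (cycles, clen, coff)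

-- ===== PRECONDITION & SPEC =====
-- Pre_ excludes exactly the inputs where the Python A raises: n ≤ 0 (ZeroDivisionError /
-- ValueError), n = 1 with m ≤ 0 (IndexError), and n ≥ 2 not coprime to A (ValueError).
def Pre_build_cycles (m : Int) (n : Int) : Prop :=
  (n = 1 ∧ 1 ≤ m) ∨ (2 ≤ n ∧ Int.gcd 1000000007 n = 1)
instance (m : Int) (n : Int) : Decidable (Pre_build_cycles m n) := by unfold Pre_build_cycles; infer_instance
def pvWitness_build_cycles : Int × Int := (3, 6)

def Spec_build_cycles (m : Int) (n : Int) (out : List (List Int) × List Int × List Int) : Prop := out = build_cycles_alt m n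
instance (m : Int) (n : Int) (out : List (List Int) × List Int × List Int) : Decidable (Spec_build_cycles m n out) := by unfold Spec_build_cycles; infer_instance

-- ===== CLAIM (what is proved, stated in full; the proofs are below) =====
def Claim_equal_build_cycles : Prop := ∀ (m : Int) (n : Int), Dom_build_cycles m n → Pre_build_cycles m n → Spec_build_cycles m n (build_cycles m n)

-- ===== LEMMAS AND PROOFS =====

theorem gcd_mod_helper (a b : Int) (ha : 0 ≤ a) (hb : 0 < b) :
    Int.gcd b (a % b) = Int.gcd a b := by
  obtain ⟨a', rfl⟩ := Int.eq_ofNat_of_zero_le ha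
  obtain ⟨b', rfl⟩ := Int.eq_ofNat_of_zero_le (le_of_lt hb)
  have : ((a' : Int) % (b' : Int)) = ((a' % b' : Nat) : Int) := by push_cast; ring_nf
  rw [this]
  simp only [Int.gcd_natCast_natCast]
  rw [Nat.gcd_comm b' (a' % b'), ← Nat.gcd_rec, Nat.gcd_comm]

theorem egcdGo_spec (A0 B0 : Int) (N : Nat) : ∀ a b x0 y0 x1 y1 : Int,
    b.natAbs ≤ N →
    A0 * x0 + B0 * y0 = a → A0 * x1 + B0 * y1 = b → 0 ≤ a → 0 ≤ b →
    ((egcdGo a b x0 y0 x1 y1).1 = Int.gcd a b ∧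
     A0 * (egcdGo a b x0 y0 x1 y1).2.1 + B0 * (egcdGo a b x0 y0 x1 y1).2.2 = (egcdGo a b x0 y0 x1 y1).1) := by
  induction N with
  | zero =>
    intro a b x0 y0 x1 y1 hN h0 h1 ha hb
    have hb0 : b = 0 := by omega
    subst hb0
    rw [egcdGo, dif_pos rfl]
    refine ⟨?_, h0⟩
    rw [Int.gcd_zero_right, Int.natAbs_of_nonneg ha]
  | succ N ih =>
    intro a b x0 y0 x1 y1 hN h0 h1 ha hb
    by_cases hb0 : b = 0
    · subst hb0
      rw [egcdGo, dif_pos rfl]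
      refine ⟨?_, h0⟩
      rw [Int.gcd_zero_right, Int.natAbs_of_nonneg ha]
    · have hbpos : 0 < b := lt_of_le_of_ne hb (Ne.symm hb0)
      have hmodeq : a - PySem.Int.floordiv a b * b = PySem.Int.mod a b := by
        have h := PySem.Int.floordiv_mul_add_mod a b
        linarith
      have hm0 : 0 ≤ PySem.Int.mod a b := PySem.Int.mod_nonneg (a := a) hbpos
      have hm1 : PySem.Int.mod a b < b := PySem.Int.mod_lt (a := a) hbpos
      rw [egcdGo, dif_neg hb0]
      have hrec := ih b (a - PySem.Int.floordiv a b * b) x1 y1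
        (x0 - PySem.Int.floordiv a b * x1) (y0 - PySem.Int.floordiv a b * y1)
        (by rw [hmodeq]; omega) h1
        (by rw [h0.symm, h1.symm]; ring)
        hb (by rw [hmodeq]; exact hm0)
      refine ⟨?_, hrec.2⟩
      rw [hrec.1, hmodeq, PySem.Int.mod_eq_emod_of_pos hbpos, gcd_mod_helper a b ha hbpos]

theorem inv_mod_spec (n : Int) (hn : 2 ≤ n) (hg : Int.gcd 1000000007 n = 1) :
    PySem.Int.mod (1000000007 * inv_mod (PySem.Int.mod 1000000007 n) n) n = 1 := by
  have hnpos : 0 < n := by omega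
  set g : Int := PySem.Int.mod 1000000007 n with hgd
  have hge : g = 1000000007 % n := PySem.Int.mod_eq_emod_of_pos hnpos
  have hg0 : 0 ≤ g := by rw [hge]; exact Int.emod_nonneg _ (by omega)
  have hg1 : g < n := by rw [hge]; exact Int.emod_lt_of_pos _ hnpos
  have hgg : PySem.Int.mod g n = g := by
    rw [PySem.Int.mod_eq_emod_of_pos hnpos, Int.emod_eq_of_lt hg0 hg1]
  have hgcdg : Int.gcd g n = 1 := by
    rw [hge, Int.gcd_comm, gcd_mod_helper 1000000007 n (by norm_num) hnpos]
    exact hg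
  have hspec := egcdGo_spec g n n.natAbs g n 1 0 0 1 (le_refl _) (by ring) (by ring) hg0
    (le_of_lt hnpos)
  have hr1 : (egcdGo g n 1 0 0 1).1 = 1 := by rw [hspec.1, hgcdg]; norm_num
  have hbez := hspec.2
  rw [hr1] at hbez
  simp only [inv_mod, egcd, hgg]
  rw [if_neg (by omega : ¬ n = 1), if_neg (by simp [hr1])]
  set x : Int := (egcdGo g n 1 0 0 1).2.1 with hxd
  set y : Int := (egcdGo g n 1 0 0 1).2.2 with hyd
  rw [PySem.Int.mod_eq_emod_of_pos hnpos, PySem.Int.mod_eq_emod_of_pos hnpos]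
  have e1 : (1000000007 * (x % n)) % n = (1000000007 * x) % n := by
    conv_lhs => rw [Int.mul_emod]
    conv_rhs => rw [Int.mul_emod]
    rw [Int.emod_emod_of_dvd x dvd_rfl]
  rw [e1]
  have e2 : (1000000007 * x) % n = (g * x) % n := by
    rw [Int.mul_emod, Int.mul_emod g, hge, Int.emod_emod_of_dvd 1000000007 dvd_rfl]
  rw [e2]
  have e3 : g * x = 1 + n * (-y) := by linarith [hbez]
  rw [e3, Int.add_mul_emod_self_left, Int.emod_eq_of_lt (by norm_num) (by omega)]

theorem tau_bounds (inva n x : Int) (hn : 0 < n) :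
    1 ≤ tau_inv inva n x ∧ tau_inv inva n x ≤ n := by
  simp only [tau_inv]
  have h0 : 0 ≤ PySem.Int.mod (inva * PySem.Int.mod (x - 1) n) n :=
    PySem.Int.mod_nonneg (a := inva * PySem.Int.mod (x - 1) n) hn
  have h1 : PySem.Int.mod (inva * PySem.Int.mod (x - 1) n) n < n :=
    PySem.Int.mod_lt (a := inva * PySem.Int.mod (x - 1) n) hn
  split_ifs with h
  · omega
  · omega

theorem tau_mod (inva n : Int) (hn : 2 ≤ n)
    (hinva : (1000000007 * inva) % n = 1) (x : Int) :
    (1000000007 * tau_inv inva n x) % n = (x - 1) % n := by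
  have hnpos : 0 < n := by omega
  simp only [tau_inv, PySem.Int.mod_eq_emod_of_pos hnpos]
  set j : Int := (x - 1) % n with hjd
  set t : Int := (inva * j) % n with htd
  have hj : j % n = j := by rw [hjd, Int.emod_emod_of_dvd _ dvd_rfl]
  have hmain : (1000000007 * t) % n = j := by
    have h2 : Int.ModEq n t (inva * j) := by
      show t % n = (inva * j) % n
      rw [htd, Int.emod_emod_of_dvd _ dvd_rfl]
    have h3 : Int.ModEq n (1000000007 * t) (1000000007 * inva * j) := by
      have h := Int.ModEq.mul_left 1000000007 h2
      rw [← mul_assoc] at h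
      exact h
    have h4 : Int.ModEq n (1000000007 * inva * j) (1 * j) :=
      Int.ModEq.mul_right j (show Int.ModEq n (1000000007 * inva) 1 by
        show (1000000007 * inva) % n = 1 % n
        rw [hinva, Int.emod_eq_of_lt (by norm_num) (by omega)])
    have h5 := h3.trans h4
    rw [one_mul] at h5
    show (1000000007 * t) % n = j
    rw [h5]
    exact hj
  split_ifs with h
  · rw [h] at hmain
    norm_num at hmain
    rw [Int.mul_emod_left]
    omega
  · exact hmain

theorem tau_unique (n : Int) (hn : 2 ≤ n) (hg : Int.gcd 1000000007 n = 1)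
    (e e' : Int) (he1 : 1 ≤ e) (he2 : e ≤ n) (he1' : 1 ≤ e') (he2' : e' ≤ n)
    (h : (1000000007 * e) % n = (1000000007 * e') % n) : e = e' := by
  have hdvd : n ∣ 1000000007 * e' - 1000000007 * e := Int.ModEq.dvd h
  have hdvd2 : n ∣ 1000000007 * (e' - e) := by
    have : 1000000007 * (e' - e) = 1000000007 * e' - 1000000007 * e := by ring
    rw [this]; exact hdvd
  have hcop : IsCoprime n (1000000007 : Int) := by
    rw [Int.isCoprime_iff_gcd_eq_one, Int.gcd_comm]
    exact hg
  have hdvd3 : n ∣ e' - e := hcop.dvd_of_dvd_mul_left hdvd2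
  have : e' - e = 0 := Int.eq_zero_of_abs_lt_dvd hdvd3 (abs_lt.mpr ⟨by omega, by omega⟩)
  omega

theorem tau_congr (inva n x y : Int)
    (h : PySem.Int.mod (x - 1) n = PySem.Int.mod (y - 1) n) :
    tau_inv inva n x = tau_inv inva n y := by
  simp only [tau_inv]
  rw [h]

theorem tbl_len (n : Int) : ∀ (es : List Int) (p0 : List Int),
    (es.foldl (fun p e => PySem.List.pySetD p (PySem.Int.mod (1000000007 * e) n) e) p0).length
      = p0.length := by
  intro es
  induction es with
  | nil => intro p0; rfl
  | cons e es ih => intro p0; rw [List.foldl_cons, ih, PySem.List.length_pySetD]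

theorem tbl_skip (n : Int) : ∀ (es : List Int) (p0 : List Int) (jn : Nat),
    (∀ e ∈ es, PySem.Int.mod (1000000007 * e) n ≠ (jn : Int)) →
    (∀ e ∈ es, 0 ≤ PySem.Int.mod (1000000007 * e) n) →
    (es.foldl (fun p e => PySem.List.pySetD p (PySem.Int.mod (1000000007 * e) n) e) p0)[jn]?
      = p0[jn]? := by
  intro es
  induction es with
  | nil => intro p0 jn _ _; rfl
  | cons e es ih =>
    intro p0 jn hne hpos
    rw [List.foldl_cons,
      ih _ _ (fun e' he' => hne e' (List.mem_cons_of_mem _ he'))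
             (fun e' he' => hpos e' (List.mem_cons_of_mem _ he')),
      PySem.List.pySetD_of_nonneg _ _ (hpos e List.mem_cons_self)]
    refine List.getElem?_set_ne ?_
    have h1 := hne e List.mem_cons_self
    have h2 := hpos e List.mem_cons_self
    omega

theorem table_spec (n inva : Int) (hn : 2 ≤ n) (hg : Int.gcd 1000000007 n = 1)
    (hinva : (1000000007 * inva) % n = 1) (j : Int) (h0 : 0 ≤ j) (h1 : j < n) :
    PySem.List.pyGetD
      ((PySem.List.pyRange 1 (n + 1) 1).foldl
        (fun p e => PySem.List.pySetD p (PySem.Int.mod (1000000007 * e) n) e)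
        (List.replicate n.toNat 0)) j 0 = tau_inv inva n (j + 1) := by
  have hnpos : 0 < n := by omega
  obtain ⟨he1, he2⟩ := tau_bounds inva n (j + 1) hnpos
  set e : Int := tau_inv inva n (j + 1) with hed
  have hfe : PySem.Int.mod (1000000007 * e) n = j := by
    rw [PySem.Int.mod_eq_emod_of_pos hnpos, hed, tau_mod inva n hn hinva]
    simpa using Int.emod_eq_of_lt h0 h1
  have hsplit : PySem.List.pyRange 1 (n + 1) 1
      = PySem.List.pyRange 1 e 1 ++ (e :: PySem.List.pyRange (e + 1) (n + 1) 1) := by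
    rw [PySem.List.pyRange_one_append 1 e (n + 1) he1 (by omega),
        PySem.List.pyRange_one_cons (by omega : e < n + 1)]
  have hmodpos : ∀ z : Int, 0 ≤ PySem.Int.mod (1000000007 * z) n :=
    fun z => PySem.Int.mod_nonneg (a := 1000000007 * z) hnpos
  have hne : ∀ e' ∈ PySem.List.pyRange (e + 1) (n + 1) 1,
      PySem.Int.mod (1000000007 * e') n ≠ (j.toNat : Int) := by
    intro e' he'
    rw [PySem.List.mem_pyRange_one] at he'
    intro hcontra
    have hj' : (j.toNat : Int) = j := Int.toNat_of_nonneg h0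
    have heq : (1000000007 * e') % n = (1000000007 * e) % n := by
      rw [← PySem.Int.mod_eq_emod_of_pos hnpos, ← PySem.Int.mod_eq_emod_of_pos hnpos,
        hcontra, hj', hfe]
    have := tau_unique n hn hg e' e (by omega) (by omega) he1 he2 heq
    omega
  rw [hsplit, List.foldl_append, List.foldl_cons]
  have hlen1 : ((PySem.List.pyRange 1 e 1).foldl
      (fun p e => PySem.List.pySetD p (PySem.Int.mod (1000000007 * e) n) e)
      (List.replicate n.toNat 0)).length = n.toNat := by
    rw [tbl_len, List.length_replicate]
  have hjn : j.toNat < n.toNat := by omega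
  have hget : ((PySem.List.pyRange (e + 1) (n + 1) 1).foldl
      (fun p e => PySem.List.pySetD p (PySem.Int.mod (1000000007 * e) n) e)
      (PySem.List.pySetD ((PySem.List.pyRange 1 e 1).foldl
        (fun p e => PySem.List.pySetD p (PySem.Int.mod (1000000007 * e) n) e)
        (List.replicate n.toNat 0)) (PySem.Int.mod (1000000007 * e) n) e))[j.toNat]?
      = some e := by
    rw [tbl_skip n _ _ _ hne (fun e' _ => hmodpos e'), hfe,
      PySem.List.pySetD_of_nonneg _ _ h0, List.getElem?_set_self (by rw [hlen1]; exact hjn)]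
  have hlenall : ((PySem.List.pyRange (e + 1) (n + 1) 1).foldl
      (fun p e => PySem.List.pySetD p (PySem.Int.mod (1000000007 * e) n) e)
      (PySem.List.pySetD ((PySem.List.pyRange 1 e 1).foldl
        (fun p e => PySem.List.pySetD p (PySem.Int.mod (1000000007 * e) n) e)
        (List.replicate n.toNat 0)) (PySem.Int.mod (1000000007 * e) n) e)).length = n.toNat := by
    rw [tbl_len, PySem.List.length_pySetD, hlen1]
  rw [PySem.List.pyGetD_eq_getElem _ _ h0 (by rw [hlenall]; omega)]
  rw [List.getElem?_eq_getElem (by rw [hlenall]; exact hjn)] at hget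
  exact Option.some.inj hget

theorem inner_spec (n inva : Int) (p : List Int) (l base : Int)
    (hE : ∀ k : Nat, PySem.List.pyGetD p (PySem.Int.mod (base + (k : Int)) n) 0
          = tau_inv inva n (base + 1 + (k : Int))) :
    ∀ (K : Nat) (cl co : List Int),
    (List.range K).foldl (fun (s : List Int × List Int × List Int) (k : Nat) =>
        (s.1 ++ [PySem.List.pyGetD p (PySem.Int.mod (base + (k : Int)) n) 0],
         PySem.List.pySetD s.2.1 (PySem.List.pyGetD p (PySem.Int.mod (base + (k : Int)) n) 0) l,
         PySem.List.pySetD s.2.2 (PySem.List.pyGetD p (PySem.Int.mod (base + (k : Int)) n) 0) (k : Int)))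
      (([] : List Int), cl, co)
    = ((List.range K).map (fun (k : Nat) => tau_inv inva n (base + 1 + (k : Int))),
       ((PySem.List.enumerate ((List.range K).map (fun (k : Nat) => tau_inv inva n (base + 1 + (k : Int)))) 0).foldl
         (fun q ie => (PySem.List.pySetD q.1 ie.2 l, PySem.List.pySetD q.2 ie.2 ie.1)) (cl, co))) := by
  intro K
  induction K with
  | zero => intro cl co; rfl
  | succ K ih =>
    intro cl co
    rw [List.range_succ, List.foldl_append, List.map_append, ih, List.foldl_cons, List.foldl_nil,
      PySem.List.enumerate_append, List.foldl_append]
    simp only [List.map_cons, List.map_nil, List.length_map, List.length_range,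
      PySem.List.enumerate_cons, PySem.List.enumerate_nil, List.foldl_cons, List.foldl_nil,
      zero_add, hE K]

theorem step_eq (n inva : Int) (p : List Int) (hnpos : 0 < n)
    (hp : ∀ j : Int, 0 ≤ j → j < n → PySem.List.pyGetD p j 0 = tau_inv inva n (j + 1))
    (st : List (List Int) × List Int × List Int) (l : Int) :
    (let start := PySem.Int.floordiv (l * (l - 1)) 2 + 1
     let cyc := (PySem.List.pyRange start (start + l) 1).map (fun x => tau_inv inva n x)
     let cl := (PySem.List.enumerate cyc 0).foldl (fun q ie =>
       (PySem.List.pySetD q.1 ie.2 l, PySem.List.pySetD q.2 ie.2 ie.1)) (st.2.1, st.2.2)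
     (PySem.List.pySetD st.1 l cyc, cl.1, cl.2))
    = (let base := PySem.Int.floordiv (l * (l - 1)) 2
       let inner := (PySem.List.pyRange 0 l 1).foldl (fun s idx =>
         let e := PySem.List.pyGetD p (PySem.Int.mod (base + idx) n) 0
         (s.1 ++ [e], PySem.List.pySetD s.2.1 e l, PySem.List.pySetD s.2.2 e idx))
         ([], st.2.1, st.2.2)
       (PySem.List.pySetD st.1 l inner.1, inner.2.1, inner.2.2)) := by
  dsimp only
  set base : Int := PySem.Int.floordiv (l * (l - 1)) 2 with hbase
  have hmm : ∀ z : Int, PySem.Int.mod (PySem.Int.mod z n) n = PySem.Int.mod z n := by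
    intro z
    simp only [PySem.Int.mod_eq_emod_of_pos hnpos]
    exact Int.emod_emod_of_dvd _ dvd_rfl
  have hE : ∀ k : Nat, PySem.List.pyGetD p (PySem.Int.mod (base + (k : Int)) n) 0
      = tau_inv inva n (base + 1 + (k : Int)) := by
    intro k
    have h0 : 0 ≤ PySem.Int.mod (base + (k : Int)) n :=
      PySem.Int.mod_nonneg (a := base + (k : Int)) hnpos
    have h1 : PySem.Int.mod (base + (k : Int)) n < n :=
      PySem.Int.mod_lt (a := base + (k : Int)) hnpos
    rw [hp _ h0 h1]
    refine tau_congr inva n _ _ ?_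
    rw [add_sub_cancel_right]
    have : base + 1 + (k : Int) - 1 = base + (k : Int) := by ring
    rw [this, hmm]
  -- rewrite both ranges as maps over List.range l.toNat
  rw [PySem.List.pyRange_one (base + 1) (base + 1 + l), PySem.List.pyRange_one 0 l,
    add_sub_cancel_left, sub_zero, List.map_map, List.foldl_map]
  simp only [Function.comp_def, zero_add]
  rw [inner_spec n inva p l base hE l.toNat st.2.1 st.2.2]

theorem build_cycles_main : ∀ (m n : Int), Pre_build_cycles m n → build_cycles m n = build_cycles_alt m n := by
  intro m n hpre
  rcases hpre with ⟨h1, hm⟩ | ⟨hn, hg⟩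
  · subst h1
    rfl
  · have hnpos : 0 < n := by omega
    have hne : ¬ n = 1 := by omega
    simp only [build_cycles, build_cycles_alt, if_neg hne]
    have hinva : (1000000007 * inv_mod (PySem.Int.mod 1000000007 n) n) % n = 1 := by
      have h := inv_mod_spec n hn hg
      rwa [PySem.Int.mod_eq_emod_of_pos hnpos] at h
    refine PySem.List.foldl_congr_mem _ _ _ _ ?_
    intro acc x _
    exact step_eq n (inv_mod (PySem.Int.mod 1000000007 n) n) _ hnpos
      (fun j h0 h1 => table_spec n _ hn hg hinva j h0 h1) acc x

-- ===== VERDICT (by name: the statement is the Claim_ definition above) =====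
theorem build_cycles_spec : Claim_equal_build_cycles := by
  intro m n _ hpre
  unfold Spec_build_cycles
  exact build_cycles_main m n hpre
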